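-- pv_equiv track=rewrite | github.com/mutjin08/toybox-algorithm | 프로그래머스-알고리즘/주사위 고르기.py | compete
-- ===== SOURCE A (Python) =====
-- def compete(aScores, bScores):
--     answer = 0
--     aScores.sort()
--     bScores.sort()
--
--     for a in aScores:
--         left, right = 0, len(bScores)-1
--         while left <= right:
--             mid = (left+right)//2
--
--             if bScores[mid] < a:
--                 answer+= mid - left + 1
--                 left = mid+1
--             else:
--                 right = mid-1
--
--     return answer
-- ===== SOURCE B (Python) =====
-- def compete(aScores, bScores):
--     aScores.sort()
--     bScores.sort()
--     answer = 0
--     j = 0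
--     for a in aScores:
--         while j < len(bScores) and bScores[j] < a:
--             j += 1
--         answer += j
--     return answer
-- ===== Notes on version B (the rewrite author's own statement) =====
-- stated objective: faster
-- what changed: Replaces the per-element binary search over bScores with a single two-pointer merge sweep over both sorted lists, so the work after sorting is one linear pass instead of a log-factor search per element.
import Mathlib
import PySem

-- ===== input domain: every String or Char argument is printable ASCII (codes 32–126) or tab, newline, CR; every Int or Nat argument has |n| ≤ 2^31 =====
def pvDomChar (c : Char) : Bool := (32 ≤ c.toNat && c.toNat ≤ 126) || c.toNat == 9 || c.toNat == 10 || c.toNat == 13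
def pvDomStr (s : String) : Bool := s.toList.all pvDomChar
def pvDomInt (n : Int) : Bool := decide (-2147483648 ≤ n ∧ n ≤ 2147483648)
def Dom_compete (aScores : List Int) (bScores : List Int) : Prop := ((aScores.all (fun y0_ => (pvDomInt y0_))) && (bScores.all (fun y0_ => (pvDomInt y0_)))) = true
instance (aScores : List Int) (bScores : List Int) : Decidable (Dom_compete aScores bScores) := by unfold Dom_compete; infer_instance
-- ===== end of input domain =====

-- B replaces A's per-element binary search with a single two-pointer merge sweep over both
-- sorted lists (objective: faster after sorting by a constant log-factor). Both A and B sort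
-- both argument lists in place; the equivalence proved here is about the return value.

-- ===== PORT A =====
-- A's inner while-loop: left/right/mid binary search, accumulating into answer.
-- bScores[mid] is ported with pyGet?; mid always lies in range when the loop runs
-- (0 ≤ left ≤ mid ≤ right ≤ len-1), so the .getD 0 default is never the value used.
-- termination measures for the ports (cited by name in decreasing_by)
theorem binLoop_dec_left (left right : Int) (h : left ≤ right) :
    (right + 1 - (PySem.Int.floordiv (left + right) 2 + 1)).toNat < (right + 1 - left).toNat := by
  have := PySem.Int.floordiv_two_mid_bounds (lo := left) (hi := right) h
  omega

theorem binLoop_dec_right (left right : Int) (h : left ≤ right) :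
    (PySem.Int.floordiv (left + right) 2 - 1 + 1 - left).toNat < (right + 1 - left).toNat := by
  have := PySem.Int.floordiv_two_mid_bounds (lo := left) (hi := right) h
  omega

theorem advance_dec (n j : Int) (h : j < n) : (n - (j + 1)).toNat < (n - j).toNat := by
  omega

def binLoop (b : List Int) (a : Int) (left right ans : Int) : Int :=
  if h : left ≤ right then
    if (PySem.List.pyGet? b (PySem.Int.floordiv (left + right) 2)).getD 0 < a then
      binLoop b a (PySem.Int.floordiv (left + right) 2 + 1) right
        (ans + (PySem.Int.floordiv (left + right) 2 - left + 1))
    else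
      binLoop b a left (PySem.Int.floordiv (left + right) 2 - 1) ans
  else ans
termination_by (right + 1 - left).toNat
decreasing_by
  · exact binLoop_dec_left left right h
  · exact binLoop_dec_right left right h

def compete (aScores : List Int) (bScores : List Int) : Int :=
  let sa := PySem.List.sorted aScores (fun x => x) false
  let sb := PySem.List.sorted bScores (fun x => x) false
  sa.foldl (fun ans a => binLoop sb a 0 ((sb.length : Int) - 1) ans) 0

-- ===== PORT B =====
-- B's inner while-loop: advance pointer j while bScores[j] < a.
def advance (b : List Int) (a : Int) (j : Int) : Int :=
  if h : j < (b.length : Int) ∧ (PySem.List.pyGet? b j).getD 0 < a then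
    advance b a (j + 1)
  else j
termination_by ((b.length : Int) - j).toNat
decreasing_by exact advance_dec _ j h.1

def compete_alt (aScores : List Int) (bScores : List Int) : Int :=
  let sa := PySem.List.sorted aScores (fun x => x) false
  let sb := PySem.List.sorted bScores (fun x => x) false
  (sa.foldl (fun (s : Int × Int) a =>
      let j := advance sb a s.1
      (j, s.2 + j)) (0, 0)).2

-- ===== PRECONDITION & SPEC =====
def Spec_compete (aScores : List Int) (bScores : List Int) (out : Int) : Prop := out = compete_alt aScores bScores
instance (aScores : List Int) (bScores : List Int) (out : Int) : Decidable (Spec_compete aScores bScores out) := by unfold Spec_compete; infer_instance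

-- ===== CLAIM (what is proved, stated in full; the proofs are below) =====
def Claim_equal_compete : Prop := ∀ (aScores : List Int) (bScores : List Int), Dom_compete aScores bScores → Spec_compete aScores bScores (compete aScores bScores)

-- ===== LEMMAS AND PROOFS =====

-- number of elements of b strictly below a, as an Int
def cntLt (b : List Int) (a : Int) : Int := (b.countP (fun x => decide (x < a)) : Int)

theorem cntLt_nonneg (b : List Int) (a : Int) : 0 ≤ cntLt b a := by
  simp [cntLt]

theorem cntLt_le_length (b : List Int) (a : Int) : cntLt b a ≤ (b.length : Int) := by
  simp only [cntLt]
  exact_mod_cast List.countP_le_length (l := b)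

theorem cntLt_mono (b : List Int) {a a' : Int} (h : a ≤ a') : cntLt b a ≤ cntLt b a' := by
  simp only [cntLt, Int.ofNat_le]
  exact List.countP_mono_left (fun x _ hx => by
    simp only [decide_eq_true_eq] at *; omega)

-- sorted characterization: an index holds an element < a iff it is below cntLt
theorem sorted_char (b : List Int) (hs : b.Pairwise (· ≤ ·)) (a : Int) :
    ∀ (i : Nat) (h : i < b.length), (b[i] < a ↔ (i : Int) < cntLt b a) := by
  induction b with
  | nil => intro i h; simp at h
  | cons x t ih =>
    rw [List.pairwise_cons] at hs
    intro i h
    by_cases hx : x < a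
    · have hc : cntLt (x :: t) a = cntLt t a + 1 := by
        simp [cntLt, hx]
      cases i with
      | zero =>
        simp [hx, hc]
        have := cntLt_nonneg t a
        omega
      | succ j =>
        simp only [List.getElem_cons_succ, hc]
        have hj : j < t.length := by simpa using h
        have := ih hs.2 j hj
        constructor
        · intro hlt; have := this.mp hlt; push_cast; omega
        · intro hlt; exact this.mpr (by push_cast at hlt ⊢; omega)
    · have hc : cntLt (x :: t) a = 0 := by
        simp only [cntLt]
        norm_cast
        rw [List.countP_eq_zero]
        intro y hy
        rcases List.mem_cons.mp hy with rfl | hyt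
        · simpa using hx
        · have := hs.1 y hyt
          simp only [decide_eq_true_eq]; omega
      rw [hc]
      cases i with
      | zero => simpa using hx
      | succ j =>
        have hj : j < t.length := by simpa using h
        simp only [List.getElem_cons_succ]
        constructor
        · intro hlt
          have := hs.1 _ (List.getElem_mem hj)
          omega
        · intro hlt; omega

-- pyGet? on an in-range nonnegative index
theorem pyGet_getD (b : List Int) (i : Int) (h0 : 0 ≤ i) (h : i < (b.length : Int)) :
    (PySem.List.pyGet? b i).getD 0 = b[i.toNat]'(by omega) := by
  obtain ⟨n, rfl⟩ : ∃ n : Nat, i = (n : Int) := ⟨i.toNat, by omega⟩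
  rw [PySem.List.pyGet?_natCast]
  simp [List.getElem?_eq_getElem (show n < b.length by omega)]

theorem binLoop_eq (b : List Int) (hs : b.Pairwise (· ≤ ·)) (a : Int) :
    ∀ (left right ans : Int), 0 ≤ left → left ≤ right + 1 → right ≤ (b.length : Int) - 1 →
      binLoop b a left right ans = ans + min (right + 1) (cntLt b a) - min left (cntLt b a) := by
  intro left right ans
  induction left, right, ans using binLoop.induct b a with
  | case1 left right ans h hlt ih =>
    intro h0 hlr hr
    have hm := PySem.Int.floordiv_two_mid_bounds (lo := left) (hi := right) h
    set mid := PySem.Int.floordiv (left + right) 2 with hmid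
    have hlt' := hlt
    rw [pyGet_getD b mid (by omega) (by omega)] at hlt'
    have hchar := (sorted_char b hs a mid.toNat (by omega)).mp hlt'
    have hmK : mid < cntLt b a := by omega
    rw [binLoop]
    simp only [h, dif_pos, ← hmid, hlt, if_pos]
    rw [ih (by omega) (by omega) hr]
    omega
  | case2 left right ans h hlt ih =>
    intro h0 hlr hr
    have hm := PySem.Int.floordiv_two_mid_bounds (lo := left) (hi := right) h
    set mid := PySem.Int.floordiv (left + right) 2 with hmid
    have hlt' := hlt
    rw [pyGet_getD b mid (by omega) (by omega)] at hlt'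
    have hchar : ¬ ((mid : Int) < cntLt b a) := by
      intro hc
      exact hlt' ((sorted_char b hs a mid.toNat (by omega)).mpr (by omega))
    rw [binLoop]
    simp only [h, dif_pos, ← hmid, hlt, if_neg, not_false_iff]
    rw [ih h0 (by omega) (by omega)]
    omega
  | case3 left right ans h =>
    intro h0 hlr hr
    rw [binLoop]
    simp only [h, dif_neg, not_false_iff]
    omega

theorem advance_eq (b : List Int) (hs : b.Pairwise (· ≤ ·)) (a : Int) :
    ∀ (j : Int), 0 ≤ j → j ≤ cntLt b a → advance b a j = cntLt b a := by
  intro j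
  induction j using advance.induct b a with
  | case1 j h ih =>
    intro h0 hj
    obtain ⟨hjl, hlt⟩ := h
    have hlt' := hlt
    rw [pyGet_getD b j h0 hjl] at hlt'
    have := (sorted_char b hs a j.toNat (by omega)).mp hlt'
    rw [advance]
    simp only [hjl, hlt, and_self, dif_pos]
    exact ih (by omega) (by omega)
  | case2 j h =>
    intro h0 hj
    rw [advance]
    rw [dif_neg h]
    by_cases hjl : j < (b.length : Int)
    · have hlt : ¬ ((PySem.List.pyGet? b j).getD 0 < a) := fun hc => h ⟨hjl, hc⟩
      rw [pyGet_getD b j h0 hjl] at hlt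
      have : ¬ ((j : Int) < cntLt b a) := by
        intro hc
        exact hlt ((sorted_char b hs a j.toNat (by omega)).mpr (by omega))
      omega
    · have := cntLt_le_length b a
      omega

theorem fold_eq (b : List Int) (hb : b.Pairwise (· ≤ ·)) :
    ∀ (sa : List Int), sa.Pairwise (· ≤ ·) →
      ∀ (j ans : Int), 0 ≤ j → (∀ x ∈ sa, j ≤ cntLt b x) →
        (sa.foldl (fun (s : Int × Int) a =>
            let j := advance b a s.1
            (j, s.2 + j)) (j, ans)).2
        = sa.foldl (fun ans a => binLoop b a 0 ((b.length : Int) - 1) ans) ans := by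
  intro sa
  induction sa with
  | nil => intro _ j ans _ _; rfl
  | cons a t ih =>
    intro hp j ans h0 hle
    rw [List.pairwise_cons] at hp
    simp only [List.foldl_cons]
    have hadv : advance b a j = cntLt b a :=
      advance_eq b hb a j h0 (hle a (List.mem_cons_self))
    have hbin : binLoop b a 0 ((b.length : Int) - 1) ans = ans + cntLt b a := by
      rw [binLoop_eq b hb a 0 ((b.length : Int) - 1) ans le_rfl (by
        have := cntLt_nonneg b a; omega) le_rfl]
      have h1 := cntLt_nonneg b a
      have h2 := cntLt_le_length b a
      omega
    rw [hadv, hbin]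
    exact ih hp.2 (cntLt b a) (ans + cntLt b a) (cntLt_nonneg b a)
      (fun x hx => cntLt_mono b (hp.1 x hx))

-- ===== VERDICT (by name: the statement is the Claim_ definition above) =====
theorem compete_spec : Claim_equal_compete := by
  intro aScores bScores _
  unfold Spec_compete compete compete_alt
  have hsa : (PySem.List.sorted aScores (fun x => x) false).Pairwise (· ≤ ·) := by
    simpa using PySem.List.sorted_pairwise (xs := aScores) (key := fun x => x)
  have hsb : (PySem.List.sorted bScores (fun x => x) false).Pairwise (· ≤ ·) := by
    simpa using PySem.List.sorted_pairwise (xs := bScores) (key := fun x => x)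
  exact (fold_eq _ hsb _ hsa 0 0 le_rfl
    (fun x _ => cntLt_nonneg _ x)).symm
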